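-- pv_equiv track=rewrite | github.com/Gabriellimmaa/reconhecimento-e-leitura-placa-carro-ptBR | utils.py | gerar_possibilidades_mercosul
-- ===== SOURCE A (Python) =====
-- letras_numeros = {
--     'I': '1',
--     'O': '0',
--     'Q': '0',
--     'Z': '2',
--     'S': ['5', '9'],
--     'G': '6',
--     'B': '8',
--     'A': '4',
--     'E': '8',
--     'T': '7',
--     'Y': '7',
--     'L': '1',
--     'U': '0',
--     'D': '0',
--     'R': '2',
--     'P': '0',
--     'F': '0',
--     'J': '1',
--     'K': '1',
--     'V': '0',
--     'W': '0',
--     'X': '0',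
--     'N': '0',
--     'M': '0',
--     'H': '0',
--     'C': '0',
--     'Ç': '0',
--     'Á': '0',
--     'Â': '0',
--     'Ã': '0',
--     'À': '0',
-- }
--
-- def gerar_possibilidades_mercosul(value: str):
--     def combinar_elementos(lista, prefixo=''):
--         if not lista:
--             return [prefixo]
--
--         resultado = []
--         elemento_atual = lista[0]
--         for item in elemento_atual:
--             novo_prefixo = prefixo + item
--             resultado.extend(combinar_elementos(lista[1:], novo_prefixo))
--
--         return resultado
--
--     segurar_letra = []
--     index = 0
--     for caractere in value:
--         if caractere in letras_numeros:
--             segurar_letra.append((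
--                 caractere, index
--             ))
--         index += 1
--
--     todas_possibilidades = []
--     for letra_travada, index_travado in segurar_letra:
--         index = 0
--         possibilidades = []
--         for caractere in value:
--             if(caractere != letra_travada or index != index_travado):
--                 # Se o caractere for uma letra que pode ser convertida
--                 if(caractere in letras_numeros):
--                     valor_convertido = letras_numeros[caractere]
--                     if isinstance(valor_convertido, list):
--                         possibilidade_multipla = []
--                         for letra_numero in valor_convertido:
--                             possibilidade_multipla.append(
--                                 letra_numero)
--                         possibilidades.append(possibilidade_multipla)
--                     else:
--                         possibilidades.append(valor_convertido)
--                 else: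
--                     possibilidades.append(caractere)
--             else:
--                 possibilidades.append(caractere)
--
--             index += 1
--         todas_possibilidades.extend(combinar_elementos(possibilidades))
--     return todas_possibilidades
-- ===== SOURCE B (Python) =====
-- letras_numeros = {
--     'I': '1', 'O': '0', 'Q': '0', 'Z': '2', 'S': ['5', '9'], 'G': '6',
--     'B': '8', 'A': '4', 'E': '8', 'T': '7', 'Y': '7', 'L': '1', 'U': '0',
--     'D': '0', 'R': '2', 'P': '0', 'F': '0', 'J': '1', 'K': '1', 'V': '0',
--     'W': '0', 'X': '0', 'N': '0', 'M': '0', 'H': '0', 'C': '0', 'Ç': '0',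
--     'Á': '0', 'Â': '0', 'Ã': '0', 'À': '0',
-- }
--
-- def gerar_possibilidades_mercosul(value: str):
--     def options(c):
--         v = letras_numeros.get(c)
--         if v is None:
--             return [c]
--         return list(v) if isinstance(v, list) else [v]
--
--     result = []
--     for lock in [i for i, c in enumerate(value) if c in letras_numeros]:
--         # iterative Cartesian product over per-position option pools
--         combos = [[]]
--         for i, c in enumerate(value):
--             pool = [c] if i == lock else options(c)
--             combos = [parts + [x] for parts in combos for x in pool]
--         result.extend(''.join(parts) for parts in combos)
--     return result
-- ===== Notes on version B (the rewrite author's own statement) =====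
-- stated objective: simpler
-- what changed: Replaces A's recursive prefix-threading combinar_elementos by an iterative left-fold Cartesian product over per-position option pools built once from enumerate, and collapses A's three-way element bookkeeping (str vs list vs raw char) into one options() pool function.
import Mathlib
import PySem

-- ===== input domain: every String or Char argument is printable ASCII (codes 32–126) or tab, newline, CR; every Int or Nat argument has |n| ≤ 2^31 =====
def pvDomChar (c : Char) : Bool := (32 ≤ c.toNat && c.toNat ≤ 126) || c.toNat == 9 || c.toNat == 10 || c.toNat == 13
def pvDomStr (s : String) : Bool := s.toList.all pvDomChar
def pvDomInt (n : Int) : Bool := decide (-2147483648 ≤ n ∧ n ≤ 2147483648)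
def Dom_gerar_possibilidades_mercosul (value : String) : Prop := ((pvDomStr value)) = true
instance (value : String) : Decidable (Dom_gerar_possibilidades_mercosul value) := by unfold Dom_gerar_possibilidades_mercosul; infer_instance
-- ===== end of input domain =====

-- B replaces A's recursive prefix-threading combinar_elementos by an iterative left-fold
-- Cartesian product over per-position option pools built from enumerate (simpler decomposition,
-- same cost). Equivalence of the return value is proved on the whole domain.

-- ===== PORT A =====
-- Python str-or-list dict values: .inl = a str (as its chars), .inr = a list of strs.
def letras_numeros : PySem.Dict Char (Sum (List Char) (List (List Char))) :=
  PySem.Dict.mk [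
    ('I', .inl ['1']), ('O', .inl ['0']), ('Q', .inl ['0']), ('Z', .inl ['2']),
    ('S', .inr [['5'], ['9']]), ('G', .inl ['6']), ('B', .inl ['8']), ('A', .inl ['4']),
    ('E', .inl ['8']), ('T', .inl ['7']), ('Y', .inl ['7']), ('L', .inl ['1']),
    ('U', .inl ['0']), ('D', .inl ['0']), ('R', .inl ['2']), ('P', .inl ['0']),
    ('F', .inl ['0']), ('J', .inl ['1']), ('K', .inl ['1']), ('V', .inl ['0']),
    ('W', .inl ['0']), ('X', .inl ['0']), ('N', .inl ['0']), ('M', .inl ['0']),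
    ('H', .inl ['0']), ('C', .inl ['0']), ('Ç', .inl ['0']), ('Á', .inl ['0']),
    ('Â', .inl ['0']), ('Ã', .inl ['0']), ('À', .inl ['0'])]

-- 'for item in elemento_atual': iterating a Python str yields its 1-char strings; a list, its items.
def pvItems : Sum (List Char) (List (List Char)) → List (List Char)
  | .inl s => s.map (fun ch => [ch])
  | .inr l => l

-- combinar_elementos(lista, prefixo): the recursion, resultado.extend = flatMap over the items.
def pvCombinar : List (Sum (List Char) (List (List Char))) → List Char → List String
  | [], pref => [String.ofList pref]
  | e :: rest, pref => (pvItems e).flatMap (fun item => pvCombinar rest (pref ++ item))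

-- first loop: collect (caractere, index) for convertible characters.
def pvSegurar : List Char → Int → List (Char × Int)
  | [], _ => []
  | c :: rest, i =>
    (if letras_numeros.contains c then [(c, i)] else []) ++ pvSegurar rest (i + 1)

-- inner loop: build 'possibilidades' for one locked (letra_travada, index_travado).
def pvPossib (lc : Char) (li : Int) : List Char → Int → List (Sum (List Char) (List (List Char)))
  | [], _ => []
  | c :: rest, i =>
    (if c ≠ lc ∨ i ≠ li then
      match letras_numeros.get? c with
      | some (.inr l) => Sum.inr l          -- the possibilidade_multipla copy loop rebuilds l
      | some (.inl s) => Sum.inl s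
      | none => Sum.inl [c]
    else Sum.inl [c]) :: pvPossib lc li rest (i + 1)

def gerar_possibilidades_mercosul (value : String) : List String :=
  (pvSegurar value.toList 0).flatMap
    (fun p => pvCombinar (pvPossib p.1 p.2 value.toList 0) [])

-- ===== PORT B =====
-- options(c): the per-character option pool (each option a str, as chars).
def pvConvOpt (c : Char) : List (List Char) :=
  match letras_numeros.get? c with
  | some (.inl s) => [s]
  | some (.inr l) => l
  | none => [[c]]

-- the per-position pools for one locked index, via enumerate.
def pvOpts (cs : List Char) (li : Int) : List (List (List Char)) :=
  (PySem.List.enumerate cs 0).map (fun p => if p.1 = li then [[p.2]] else pvConvOpt p.2)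

-- combos = [[]]; for pool: combos = [parts + [x] for parts in combos for x in pool]
def pvProd (opts : List (List (List Char))) : List (List (List Char)) :=
  opts.foldl (fun acc pool => acc.flatMap (fun parts => pool.map (fun x => parts ++ [x]))) [[]]

def gerar_possibilidades_mercosul_alt (value : String) : List String :=
  ((PySem.List.enumerate value.toList 0).filterMap
      (fun p => if letras_numeros.contains p.2 then some p.1 else none)).flatMap
    (fun li => (pvProd (pvOpts value.toList li)).map
      (fun parts => String.ofList (PySem.Chars.join [] parts)))  -- ''.join

-- ===== PRECONDITION & SPEC =====
def Spec_gerar_possibilidades_mercosul (value : String) (out : List String) : Prop := out = gerar_possibilidades_mercosul_alt value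
instance (value : String) (out : List String) : Decidable (Spec_gerar_possibilidades_mercosul value out) := by unfold Spec_gerar_possibilidades_mercosul; infer_instance

-- ===== CLAIM (what is proved, stated in full; the proofs are below) =====
def Claim_equal_gerar_possibilidades_mercosul : Prop := ∀ (value : String), Dom_gerar_possibilidades_mercosul value → Spec_gerar_possibilidades_mercosul value (gerar_possibilidades_mercosul value)

-- ===== LEMMAS AND PROOFS =====

-- right-recursive Cartesian product (proof-side reference shape)
def pvProdR : List (List (List Char)) → List (List (List Char))
  | [] => [[]]
  | o :: rest => o.flatMap (fun y => (pvProdR rest).map (fun t => y :: t))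

theorem pvProd_foldl (opts : List (List (List Char))) (acc : List (List (List Char))) :
    opts.foldl (fun acc pool => acc.flatMap (fun parts => pool.map (fun x => parts ++ [x]))) acc
      = acc.flatMap (fun x => (pvProdR opts).map (fun t => x ++ t)) := by
  induction opts generalizing acc with
  | nil => simp [pvProdR]
  | cons o rest ih =>
      simp only [List.foldl_cons, ih, pvProdR]
      simp [List.flatMap_assoc, List.map_flatMap, List.flatMap_map, List.map_map,
        Function.comp_def, List.append_assoc]

theorem pvProd_eq_prodR (opts : List (List (List Char))) : pvProd opts = pvProdR opts := by
  simp [pvProd, pvProd_foldl]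

theorem pvCombinar_eq (lista : List (Sum (List Char) (List (List Char)))) (pref : List Char) :
    pvCombinar lista pref
      = (pvProdR (lista.map pvItems)).map (fun parts => String.ofList (pref ++ parts.flatten)) := by
  induction lista generalizing pref with
  | nil => simp [pvCombinar, pvProdR]
  | cons e rest ih =>
      simp only [pvCombinar, ih, List.map_cons, pvProdR]
      simp [List.map_flatMap, List.map_map, Function.comp_def, List.append_assoc]

-- get? on a literal dict only returns values stored in it
theorem get?_mk_mem {κ ν : Type} [BEq κ] (ps : List (κ × ν)) (c : κ) (v : ν)
    (h : (PySem.Dict.mk ps).get? c = some v) : v ∈ ps.map (·.2) := by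
  induction ps with
  | nil => simp [PySem.Dict.get?] at h
  | cons p rest ih =>
      obtain ⟨k, w⟩ := p
      rw [PySem.Dict.get?_mk_cons] at h
      by_cases hk : (k == c) = true
      · rw [if_pos hk] at h; simp at h; simp [h]
      · rw [if_neg hk] at h; simp [ih h]

-- every non-list value of letras_numeros is a single character
theorem inl_singleton (c : Char) (s : List Char) (h : letras_numeros.get? c = some (Sum.inl s)) :
    s.map (fun ch => [ch]) = [s] := by
  have hv := get?_mk_mem _ c _ h
  simp only [List.map_cons, List.map_nil, List.mem_cons, List.not_mem_nil, or_false] at hv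
  rcases hv with h|h|h|h|h|h|h|h|h|h|h|h|h|h|h|h|h|h|h|h|h|h|h|h|h|h|h|h|h|h|h <;> simp_all

-- the A-side element for one character, seen through pvItems, is B's pool.
theorem pvItems_conv (c : Char) :
    pvItems (match letras_numeros.get? c with
      | some (.inr l) => Sum.inr l
      | some (.inl s) => Sum.inl s
      | none => Sum.inl [c]) = pvConvOpt c := by
  unfold pvConvOpt
  cases h : letras_numeros.get? c with
  | none => rfl
  | some v =>
      rcases v with s | l
      · simpa [pvItems] using inl_singleton c s h
      · rfl

theorem enumerate_fst_lb {α : Type} (l : List α) (s : Int) (p : Int × α)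
    (hp : p ∈ PySem.List.enumerate l s) : s ≤ p.1 := by
  induction l generalizing s with
  | nil => simp [PySem.List.enumerate_nil] at hp
  | cons x xs ih =>
      rw [PySem.List.enumerate_cons] at hp
      rcases List.mem_cons.mp hp with h | h
      · simp [h]
      · have := ih (s + 1) h; omega

theorem enumerate_fst_inj {α : Type} (l : List α) (s : Int) (p q : Int × α)
    (hp : p ∈ PySem.List.enumerate l s) (hq : q ∈ PySem.List.enumerate l s)
    (h : p.1 = q.1) : p = q := by
  induction l generalizing s with
  | nil => simp [PySem.List.enumerate_nil] at hp
  | cons x xs ih =>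
      rw [PySem.List.enumerate_cons] at hp hq
      rcases List.mem_cons.mp hp with hp | hp <;> rcases List.mem_cons.mp hq with hq | hq
      · rw [hp, hq]
      · exfalso; have := enumerate_fst_lb xs (s + 1) q hq; rw [hp] at h; omega
      · exfalso; have := enumerate_fst_lb xs (s + 1) p hp; rw [hq] at h; omega
      · exact ih (s + 1) hp hq

-- A's possibilidades list, through pvItems, is B's pools list (given the locked char really
-- is the char at the locked index, expressed over the enumeration).
theorem pvPossib_eq_opts (lc : Char) (li : Int) (l : List Char) (i : Int)
    (h : ∀ p ∈ PySem.List.enumerate l i, p.1 = li → p.2 = lc) :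
    (pvPossib lc li l i).map pvItems
      = (PySem.List.enumerate l i).map (fun p => if p.1 = li then [[p.2]] else pvConvOpt p.2) := by
  induction l generalizing i with
  | nil => simp [pvPossib, PySem.List.enumerate_nil]
  | cons c rest ih =>
      rw [PySem.List.enumerate_cons] at h ⊢
      simp only [pvPossib, List.map_cons, List.cons.injEq]
      refine ⟨?_, ?_⟩
      · by_cases hi : i = li
        · have hc : c = lc := h (i, c) (List.mem_cons_self ..) hi
          rw [if_pos hi, if_neg (by simp [hi, hc])]
          rfl
        · rw [if_neg hi, if_pos (Or.inr hi)]
          exact pvItems_conv c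
      · exact ih (i + 1) (fun p hp => h p (List.mem_cons_of_mem _ hp))

theorem flatten_intersperse_nil (l : List (List Char)) :
    (List.intersperse ([] : List Char) l).flatten = l.flatten := by
  induction l with
  | nil => rfl
  | cons a rest ih =>
      cases rest with
      | nil => rfl
      | cons b r =>
          rw [show List.intersperse ([] : List Char) (a :: b :: r)
                = a :: [] :: List.intersperse [] (b :: r) from rfl,
             List.flatten_cons, List.flatten_cons, List.flatten_cons, ih]
          simp

-- ''.join: joining with the empty separator is concatenation
theorem join_empty_sep (parts : List (List Char)) :
    PySem.Chars.join [] parts = parts.flatten := by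
  rw [PySem.Chars.join, List.intercalate, flatten_intersperse_nil]

theorem pvSegurar_eq (l : List Char) (i : Int) :
    pvSegurar l i = (PySem.List.enumerate l i).filterMap
      (fun p => if letras_numeros.contains p.2 then some (p.2, p.1) else none) := by
  induction l generalizing i with
  | nil => simp [pvSegurar, PySem.List.enumerate_nil]
  | cons c rest ih =>
      rw [PySem.List.enumerate_cons]
      simp only [pvSegurar, List.filterMap_cons, ih]
      by_cases h : letras_numeros.contains c <;> simp [h]

-- ===== VERDICT (by name: the statement is the Claim_ definition above) =====
theorem gerar_possibilidades_mercosul_spec : Claim_equal_gerar_possibilidades_mercosul := by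
  intro value _
  unfold Spec_gerar_possibilidades_mercosul gerar_possibilidades_mercosul gerar_possibilidades_mercosul_alt
  set cs := value.toList with hcs
  rw [pvSegurar_eq]
  set S := PySem.List.enumerate cs 0 with hS
  have hmapsnd :
      (S.filterMap (fun p => if letras_numeros.contains p.2 then some p.1 else none))
        = (S.filterMap (fun p => if letras_numeros.contains p.2 then some (p.2, p.1) else none)).map Prod.snd := by
    rw [List.map_filterMap]
    apply List.filterMap_congr
    intro p _
    by_cases h : letras_numeros.contains p.2 <;> simp [h]
  rw [hmapsnd, List.flatMap_map]
  rw [List.flatMap, List.flatMap]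
  congr 1
  apply List.map_congr_left
  intro q hq
  -- q = (c, i) came from the filterMap over the enumeration: (i, c) ∈ S
  obtain ⟨p, hpS, hpq⟩ := List.mem_filterMap.mp hq
  have hp2 : (p.2, p.1) = q := by
    by_cases h : letras_numeros.contains p.2
    · simpa [h] using hpq
    · simp [h] at hpq
  have hchar : ∀ r ∈ S, r.1 = q.2 → r.2 = q.1 := by
    intro r hr h1
    have : r = p := enumerate_fst_inj cs 0 r p hr hpS (by rw [h1, ← hp2])
    rw [this, ← hp2]
  rw [pvCombinar_eq, pvPossib_eq_opts q.1 q.2 cs 0 hchar, pvProd_eq_prodR, pvOpts]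
  apply List.map_congr_left
  intro parts _
  rw [join_empty_sep, List.nil_append]
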